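-- pv_equiv track=rewrite | github.com/thanhtrnnn/python-pshit | py01065_pheptoancoban.py | possiblenum
-- ===== SOURCE A (Python) =====
-- def possiblenum(s):
--     undefined = []
--     if s[0] == '?':
--         for i in range(1, 10):
--             undefined.append(str(i) + s[-1])
--     else:
--         undefined.append(s)
--
--     nums = []
--     if s[-1] == '?':
--         for x in undefined:
--             for i in range(10):
--                 nums.append(x[0] + str(i))
--     else:
--         nums = undefined
--
--     return nums
-- ===== SOURCE B (Python) =====
-- def possiblenum(s):
--     first_q = s[0] == '?'
--     last_q = s[-1] == '?'
--     if first_q and last_q: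
--         # both wildcards: the results are exactly the two-digit numbers
--         return [str(n) for n in range(10, 100)]
--     if first_q:
--         return [str(d) + s[-1] for d in range(1, 10)]
--     if last_q:
--         return [s[0] + str(d) for d in range(10)]
--     return [s]
-- ===== Notes on version B (the rewrite author's own statement) =====
-- stated objective: simpler
-- what changed: B replaces A's two staged append loops threaded through an intermediate list by a four-way case analysis; in the double-wildcard case it enumerates the answers by a single numeric range(10,100) closed form instead of A's nested product of digit loops.
-- outside the precondition, e.g. on possiblenum(''): A raises IndexError, B raises IndexError
import Mathlib
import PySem

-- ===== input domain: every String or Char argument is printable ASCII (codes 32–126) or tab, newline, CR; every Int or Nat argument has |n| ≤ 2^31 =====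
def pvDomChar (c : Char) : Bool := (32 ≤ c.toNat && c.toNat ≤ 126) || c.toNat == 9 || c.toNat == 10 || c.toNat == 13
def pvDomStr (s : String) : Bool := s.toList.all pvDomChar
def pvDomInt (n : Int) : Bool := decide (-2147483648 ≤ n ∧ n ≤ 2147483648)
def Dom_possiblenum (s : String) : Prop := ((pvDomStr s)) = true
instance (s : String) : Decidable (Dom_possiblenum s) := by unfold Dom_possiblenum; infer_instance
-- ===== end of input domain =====

-- B replaces A's two staged append loops by a four-way case analysis; the
-- double-wildcard case is the closed-form numeric enumeration str(n), n = 10..99.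

-- ===== PORT A =====
-- s[0] / s[-1] via PySem.Str.pyGet?; the 'none' branches are IndexError (s = ""), outside Pre_.
def possiblenum (s : String) : List String :=
  match PySem.Str.pyGet? s 0, PySem.Str.pyGet? s (-1) with
  | some c0, some cl =>
    let undefined : List String :=
      if c0 = '?' then
        (PySem.List.pyRange 1 10 1).foldl
          (fun acc i => acc ++ [String.ofList (PySem.Int.toChars i ++ [cl])]) []
      else [s]
    if cl = '?' then
      undefined.foldl (fun nums x =>
        (PySem.List.pyRange 0 10 1).foldl (fun nums i =>
          match PySem.Str.pyGet? x 0 with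
          | some xc => nums ++ [String.ofList ([xc] ++ PySem.Int.toChars i)]
          | none => nums) nums) []
    else undefined
  | _, _ => []

-- ===== PORT B =====
def possiblenum_alt (s : String) : List String :=
  match PySem.Str.pyGet? s 0 with
  | none => []
  | some c0 =>
    match PySem.Str.pyGet? s (-1) with
    | none => []
    | some cl =>
    if c0 = '?' ∧ cl = '?' then
      (PySem.List.pyRange 10 100 1).map PySem.Int.toStr
    else if c0 = '?' then
      (PySem.List.pyRange 1 10 1).map (fun d => String.ofList (PySem.Int.toChars d ++ [cl]))
    else if cl = '?' then
      (PySem.List.pyRange 0 10 1).map (fun d => String.ofList ([c0] ++ PySem.Int.toChars d))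
    else [s]

-- ===== PRECONDITION & SPEC =====
-- Pre_ excludes only the empty string, on which Python A raises IndexError (s[0]).
def Pre_possiblenum (s : String) : Prop := s.toList ≠ []
instance (s : String) : Decidable (Pre_possiblenum s) := by unfold Pre_possiblenum; infer_instance
def pvWitness_possiblenum : String := "?5"
def Spec_possiblenum (s : String) (out : List String) : Prop := out = possiblenum_alt s
instance (s : String) (out : List String) : Decidable (Spec_possiblenum s out) := by unfold Spec_possiblenum; infer_instance

-- ===== CLAIM (what is proved, stated in full; the proofs are below) =====
def Claim_equal_possiblenum : Prop := ∀ (s : String), Dom_possiblenum s → Pre_possiblenum s → Spec_possiblenum s (possiblenum s)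

-- ===== LEMMAS AND PROOFS =====

theorem pv_flatten_singleton {A B : Type} (l : List A) (f : A → B) :
    (l.map fun x => [f x]).flatten = l.map f := by
  induction l with
  | nil => rfl
  | cons a t ih => simp [ih]

set_option maxRecDepth 16000 in
theorem possiblenum_eq_alt (s : String) : possiblenum s = possiblenum_alt s := by
  unfold possiblenum possiblenum_alt
  cases h0 : PySem.Str.pyGet? s 0 with
  | none => cases h1 : PySem.Str.pyGet? s (-1) <;> rfl
  | some c0 =>
    cases h1 : PySem.Str.pyGet? s (-1) with
    | none => rfl
    | some cl =>
      have h0' : PySem.List.pyGet? s.toList 0 = some c0 := by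
        simpa [PySem.Str.pyGet?] using h0
      simp only
      by_cases hc0 : c0 = '?' <;> by_cases hcl : cl = '?'
      · subst hc0; subst hcl; simp; decide
      · simp [hc0, hcl, PySem.List.pyRange, Function.comp_def, pv_flatten_singleton]
      · simp [hc0, hcl, h0', PySem.List.pyRange, Function.comp_def, pv_flatten_singleton]
      · simp [hc0, hcl]

-- ===== VERDICT (by name: the statement is the Claim_ definition above) =====
theorem possiblenum_spec : Claim_equal_possiblenum := by
  intro s _ _
  exact possiblenum_eq_alt s
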